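-- pv_equiv track=rewrite | github.com/Bongousse/AlgorithmByPython | ct/Problem1.py | getMaximumMex
-- ===== SOURCE A (Python) =====
-- def getMaximumMex(arr, x):
--     # Write your code here
--     d = {}
--     for item in arr:
--         d[item % x] = d.get(item % x, 0) + 1
--
--     answer = 0
--     while True:
--         if answer not in d:
--             if answer - x in d and d[answer - x] > 1:
--                 d[answer] = d[answer - x] - 1
--                 d[answer - x] = 1
--             else:
--                 break
--         answer += 1
--     return answer
-- ===== SOURCE B (Python) =====
-- def getMaximumMex(arr, x):
--     # Count array elements by residue class mod x; residue class r covers the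
--     # consecutive values r, r+x, ..., r+(counts[r]-1)*x, so its first gap is
--     # r + counts[r]*x.  The MEX is the smallest such gap over all residues.
--     # Residues beyond len(counts)+1 cannot give the minimum: some residue in
--     # 0..len(counts) is absent (pigeonhole) and already yields a smaller gap.
--     counts = {}
--     for item in arr:
--         counts[item % x] = counts.get(item % x, 0) + 1
--     return min(r + counts.get(r, 0) * x for r in range(min(x, len(counts) + 1)))
-- ===== Notes on version B (the rewrite author's own statement) =====
-- stated objective: simpler
-- what changed: Replaces A's step-by-step while-loop that propagates dictionary counts one value at a time by a closed form: count elements per residue mod x once, then the MEX is min(r + counts[r]*x) over all residues r in range(x).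
-- outside the precondition, e.g. on getMaximumMex([5], -3): A returns 0, B raises ValueError; on getMaximumMex([], 0): A returns 0, B raises ValueError; on getMaximumMex([0], -1): A returns 1, B raises ValueError
import Mathlib
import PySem

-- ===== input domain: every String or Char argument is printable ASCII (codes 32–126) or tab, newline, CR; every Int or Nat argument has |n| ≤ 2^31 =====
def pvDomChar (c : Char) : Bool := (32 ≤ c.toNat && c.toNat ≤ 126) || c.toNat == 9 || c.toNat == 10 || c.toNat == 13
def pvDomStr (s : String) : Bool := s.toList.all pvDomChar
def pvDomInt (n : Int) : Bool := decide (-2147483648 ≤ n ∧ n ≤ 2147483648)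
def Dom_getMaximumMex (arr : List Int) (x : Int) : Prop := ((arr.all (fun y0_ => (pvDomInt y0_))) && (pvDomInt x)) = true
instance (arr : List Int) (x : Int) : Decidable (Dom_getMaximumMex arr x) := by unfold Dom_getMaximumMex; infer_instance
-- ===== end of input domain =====

-- B replaces A's value-by-value while-loop that propagates dict counts by the closed form
-- min over residues r of r + count[r]*x (objective: simpler).

-- ===== PORT A =====
-- Python's 'while True' loop ported with a fuel bound; under Pre_ (0 < x) the loop is proved
-- to break strictly before the fuel runs out, so the port is exact there.
def pvMexLoopA (x : Int) (fuel : Nat) (d : PySem.Dict Int Int) (answer : Int) : Int :=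
  match fuel with
  | 0 => answer
  | Nat.succ f =>
    if d.contains answer = false then
      -- 'answer - x in d and d[answer - x] > 1'; the lookup is guarded by the contains
      -- check, so getD's default is never read (exact port of Python's d[answer - x])
      if d.contains (answer - x) = true ∧ 1 < d.getD (answer - x) 0 then
        pvMexLoopA x f ((d.insert answer (d.getD (answer - x) 0 - 1)).insert (answer - x) 1) (answer + 1)
      else answer
    else pvMexLoopA x f d (answer + 1)

def getMaximumMex (arr : List Int) (x : Int) : Int :=
  let d := arr.foldl (fun d item => d.insert (PySem.Int.mod item x) (d.getD (PySem.Int.mod item x) 0 + 1)) PySem.Dict.empty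
  pvMexLoopA x (x.toNat * (arr.length + 1) + 1) d 0

-- ===== PORT B =====
def getMaximumMex_alt (arr : List Int) (x : Int) : Int :=
  let counts := arr.foldl (fun d item => d.insert (PySem.Int.mod item x) (d.getD (PySem.Int.mod item x) 0 + 1)) PySem.Dict.empty
  match PySem.List.min? ((PySem.List.pyRange 0 (min x ((counts.size : Int) + 1)) 1).map (fun r => r + counts.getD r 0 * x)) (fun y => y) with
  | some m => m
  | none => 0   -- unreachable under Pre_ (0 < x): Python's min() raises ValueError here

-- ===== PRECONDITION & SPEC =====
-- Pre_ excludes x ≤ 0: for x = 0 with nonempty arr both programs raise ZeroDivisionError,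
-- and otherwise A returns an accidental 0/1 produced by negative residues (resp. the empty
-- dict) while B's min over range(x) raises ValueError on its empty argument.
def Pre_getMaximumMex (arr : List Int) (x : Int) : Prop := 0 < x
instance (arr : List Int) (x : Int) : Decidable (Pre_getMaximumMex arr x) := by unfold Pre_getMaximumMex; infer_instance
def pvWitness_getMaximumMex : List Int × Int := ([0, 1, 5], 3)

def Spec_getMaximumMex (arr : List Int) (x : Int) (out : Int) : Prop := out = getMaximumMex_alt arr x
instance (arr : List Int) (x : Int) (out : Int) : Decidable (Spec_getMaximumMex arr x out) := by unfold Spec_getMaximumMex; infer_instance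

-- ===== CLAIM (what is proved, stated in full; the proofs are below) =====
def Claim_equal_getMaximumMex : Prop := ∀ (arr : List Int) (x : Int), Dom_getMaximumMex arr x → Pre_getMaximumMex arr x → Spec_getMaximumMex arr x (getMaximumMex arr x)

-- ===== LEMMAS AND PROOFS =====

-- number of elements of arr whose residue mod x is r
def pvResC (arr : List Int) (x r : Int) : Int := ((arr.map (fun it => PySem.Int.mod it x)).count r : Int)

-- k is covered: residue class r = k % x covers r, r+x, ..., r+(count-1)x
def pvInC (arr : List Int) (x k : Int) : Prop :=
  0 ≤ k ∧ k < PySem.Int.mod k x + pvResC arr x (PySem.Int.mod k x) * x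

-- loop invariant of A's while-loop at state (d, answer = a)
def pvInv (arr : List Int) (x : Int) (d : PySem.Dict Int Int) (a : Int) : Prop :=
  (∀ k, d.contains k = true ↔ (pvInC arr x k ∧ k < max a x)) ∧
  (∀ k, pvInC arr x k → k < max a x → pvInC arr x (k + x) → k + x < max a x →
     d.getD k 0 * x = x) ∧
  (∀ k, pvInC arr x k → k < max a x → ¬ (pvInC arr x (k + x) ∧ k + x < max a x) →
     d.getD k 0 * x = PySem.Int.mod k x + pvResC arr x (PySem.Int.mod k x) * x - k)

lemma pvMod_sub_self (a x : Int) (hx : 0 < x) :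
    PySem.Int.mod (a - x) x = PySem.Int.mod a x := by
  simp [PySem.Int.mod_eq_emod_of_pos hx, Int.sub_emod_right]

lemma pvInC_sub (arr : List Int) (x a : Int) (hx : 0 < x) (hge : x ≤ a)
    (h : pvInC arr x a) : pvInC arr x (a - x) := by
  obtain ⟨h0, h1⟩ := h
  refine ⟨by omega, ?_⟩
  rw [pvMod_sub_self a x hx]
  omega

lemma pvCounts_getD (arr : List Int) (x r : Int) :
    (arr.foldl (fun d item => d.insert (PySem.Int.mod item x) (d.getD (PySem.Int.mod item x) 0 + 1)) PySem.Dict.empty).getD r 0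
      = pvResC arr x r := by
  rw [← List.foldl_map (f := fun it => PySem.Int.mod it x)
        (g := fun (d : PySem.Dict Int Int) k => d.insert k (d.getD k 0 + 1))]
  rw [PySem.Dict.getD_foldl_insert_add_one]
  simp [pvResC]

lemma pvCounts_contains (arr : List Int) (x k : Int) :
    ((arr.foldl (fun d item => d.insert (PySem.Int.mod item x) (d.getD (PySem.Int.mod item x) 0 + 1)) (PySem.Dict.empty : PySem.Dict Int Int)).contains k = true)
      ↔ k ∈ arr.map (fun it => PySem.Int.mod it x) := by
  rw [PySem.Dict.contains_iff_mem_keys,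
      PySem.Dict.keys_foldl_insert_key arr (fun it => PySem.Int.mod it x)
        (fun d item => d.getD (PySem.Int.mod item x) 0 + 1)]
  simp [PySem.Set.mem_update, PySem.Dict.keys_empty]

lemma pvMod_self (x k : Int) (hx : 0 < x) (h0 : 0 ≤ k) (h1 : k < x) :
    PySem.Int.mod k x = k := by
  rw [PySem.Int.mod_eq_emod_of_pos hx]; exact Int.emod_eq_of_lt h0 h1

lemma pvMem_map_iff (arr : List Int) (x k : Int) (hx : 0 < x) :
    k ∈ arr.map (fun it => PySem.Int.mod it x) ↔ (0 ≤ k ∧ k < x ∧ 0 < pvResC arr x k) := by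
  constructor
  · intro hmem
    obtain ⟨it, _, rfl⟩ := List.mem_map.mp hmem
    exact ⟨PySem.Int.mod_nonneg it hx, PySem.Int.mod_lt it hx,
      by unfold pvResC; exact_mod_cast List.count_pos_iff.mpr hmem⟩
  · rintro ⟨_, _, hc⟩
    have : 0 < (arr.map (fun it => PySem.Int.mod it x)).count k := by
      unfold pvResC at hc; exact_mod_cast hc
    exact List.count_pos_iff.mp this

lemma pvInC_small_iff (arr : List Int) (x k : Int) (hx : 0 < x) :
    (pvInC arr x k ∧ k < x) ↔ (0 ≤ k ∧ k < x ∧ 0 < pvResC arr x k) := by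
  constructor
  · rintro ⟨⟨h0, h1⟩, h2⟩
    rw [pvMod_self x k hx h0 h2] at h1
    refine ⟨h0, h2, ?_⟩
    nlinarith
  · rintro ⟨h0, h1, h2⟩
    refine ⟨⟨h0, ?_⟩, h1⟩
    rw [pvMod_self x k hx h0 h1]
    nlinarith

lemma pvInv_init (arr : List Int) (x : Int) (hx : 0 < x) :
    pvInv arr x (arr.foldl (fun d item => d.insert (PySem.Int.mod item x) (d.getD (PySem.Int.mod item x) 0 + 1)) PySem.Dict.empty) 0 := by
  have hmax : max (0 : Int) x = x := max_eq_right hx.le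
  refine ⟨?_, ?_, ?_⟩
  · intro k
    rw [hmax]
    exact (pvCounts_contains arr x k).trans
      ((pvMem_map_iff arr x k hx).trans (pvInC_small_iff arr x k hx).symm)
  · intro k hk hlt hkx hltx
    rw [hmax] at hlt hltx
    obtain ⟨h0, _⟩ := hk
    omega
  · intro k hk hlt _
    rw [hmax] at hlt
    obtain ⟨h0, _⟩ := hk
    rw [pvCounts_getD arr x k, pvMod_self x k hx h0 hlt]
    ring

lemma pvMexLoop_eq (arr : List Int) (x M : Int) (hx : 0 < x)
    (hM0 : 0 ≤ M) (hMlow : ∀ k, 0 ≤ k → k < M → pvInC arr x k) (hMtop : ¬ pvInC arr x M) :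
    ∀ (fuel : Nat) (a : Int) (d : PySem.Dict Int Int),
      pvInv arr x d a → 0 ≤ a → a ≤ M → M < a + (fuel : Int) →
      pvMexLoopA x fuel d a = M := by
  intro fuel
  induction fuel with
  | zero => intro a d _ _ haM hf; norm_num at hf; omega
  | succ f ih =>
    intro a d hInv ha0 haM hf
    obtain ⟨hK, hV1, hV2⟩ := hInv
    simp only [pvMexLoopA]
    by_cases hca : d.contains a = true
    · -- first branch of the Python if: answer ∈ d, just advance
      obtain ⟨hInCa, halt⟩ := (hK a).mp hca
      have hax : a < x := by omega
      have haM' : a < M := by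
        rcases eq_or_lt_of_le haM with rfl | h
        · exact absurd hInCa hMtop
        · exact h
      rw [if_neg (by simp [hca])]
      have hmx : max (a + 1) x = max a x := by omega
      have hInv' : pvInv arr x d (a + 1) := by
        unfold pvInv; rw [hmx]; exact ⟨hK, hV1, hV2⟩
      apply ih (a + 1) d hInv' (by omega) (by omega) (by push_cast at hf ⊢; omega)
    · rw [if_pos (by simpa using hca)]
      rcases eq_or_lt_of_le haM with rfl | haltM
      · -- a = M: the loop breaks here and returns M
        rw [if_neg]
        rintro ⟨hc2, hv⟩
        obtain ⟨hInCax, haxlt⟩ := (hK (a - x)).mp hc2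
        have hcond : ¬ (pvInC arr x (a - x + x) ∧ a - x + x < max a x) := by
          rw [show a - x + x = a by ring]
          rintro ⟨h, _⟩; exact hMtop h
        have hveq := hV2 (a - x) hInCax haxlt hcond
        rw [pvMod_sub_self a x hx] at hveq
        obtain ⟨_, hltax⟩ := hInCax
        rw [pvMod_sub_self a x hx] at hltax
        have hTa : PySem.Int.mod a x + pvResC arr x (PySem.Int.mod a x) * x ≤ a := by
          by_contra hcon
          exact hMtop ⟨hM0, by omega⟩
        nlinarith [mul_le_mul_of_nonneg_right (by linarith : (2:ℤ) ≤ d.getD (a - x) 0) hx.le]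
      · -- a < M, a ∉ d: the split branch is taken
        have hInCa := hMlow a ha0 haltM
        have hxa : x ≤ a := by
          by_contra hcon
          exact hca ((hK a).mpr ⟨hInCa, by omega⟩)
        have hmaxa : max a x = a := by omega
        have hmax1 : max (a + 1) x = a + 1 := by omega
        have hInCax : pvInC arr x (a - x) := pvInC_sub arr x a hx hxa hInCa
        have hc2 : d.contains (a - x) = true := (hK (a - x)).mpr ⟨hInCax, by omega⟩
        have hcond : ¬ (pvInC arr x (a - x + x) ∧ a - x + x < max a x) := by
          rintro ⟨_, hlt'⟩; omega
        have hveq := hV2 (a - x) hInCax (by omega) hcond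
        rw [pvMod_sub_self a x hx] at hveq
        have hltaT := hInCa.2
        have hdvd : x ∣ (PySem.Int.mod a x + pvResC arr x (PySem.Int.mod a x) * x - a) := by
          have h1 : x ∣ a - PySem.Int.mod a x := by
            rw [PySem.Int.mod_eq_emod_of_pos hx]
            exact Int.dvd_self_sub_of_emod_eq rfl
          have h2 : PySem.Int.mod a x + pvResC arr x (PySem.Int.mod a x) * x - a
              = pvResC arr x (PySem.Int.mod a x) * x - (a - PySem.Int.mod a x) := by ring
          rw [h2]
          exact dvd_sub (dvd_mul_left x _) h1
        have hxle : x ≤ PySem.Int.mod a x + pvResC arr x (PySem.Int.mod a x) * x - a :=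
          Int.le_of_dvd (by omega) hdvd
        have hv : 1 < d.getD (a - x) 0 := by
          by_contra hcon
          rw [not_lt] at hcon
          nlinarith [mul_le_mul_of_nonneg_right hcon hx.le]
        rw [if_pos ⟨hc2, hv⟩]
        have hInv' : pvInv arr x ((d.insert a (d.getD (a - x) 0 - 1)).insert (a - x) 1) (a + 1) := by
          refine ⟨?_, ?_, ?_⟩
          · intro k
            simp only [PySem.Dict.contains_insert, Bool.or_eq_true, beq_iff_eq, hK k, hmaxa, hmax1]
            constructor
            · rintro (rfl | rfl | ⟨hk, hlt⟩)
              · exact ⟨hInCax, by omega⟩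
              · exact ⟨hInCa, by omega⟩
              · exact ⟨hk, by omega⟩
            · rintro ⟨hk, hlt⟩
              by_cases h1 : k = a - x
              · exact Or.inl h1
              by_cases h2 : k = a
              · exact Or.inr (Or.inl h2)
              · exact Or.inr (Or.inr ⟨hk, by omega⟩)
          · intro k hk hlt hkx hltx
            rw [hmax1] at hlt hltx
            rw [PySem.Dict.getD_insert, PySem.Dict.getD_insert]
            by_cases h1 : k = a - x
            · rw [if_pos h1]; ring
            rw [if_neg h1]
            by_cases h2 : k = a
            · exfalso; omega
            rw [if_neg h2]
            exact hV1 k hk (by omega) hkx (by omega)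
          · intro k hk hlt hnot
            rw [hmax1] at hlt hnot
            rw [PySem.Dict.getD_insert, PySem.Dict.getD_insert]
            by_cases h1 : k = a - x
            · exfalso
              apply hnot
              subst h1
              rw [show a - x + x = a by ring]
              exact ⟨hInCa, by omega⟩
            rw [if_neg h1]
            by_cases h2 : k = a
            · rw [if_pos h2, h2]
              have : (d.getD (a - x) 0 - 1) * x = d.getD (a - x) 0 * x - x := by ring
              rw [this, hveq]
              ring
            rw [if_neg h2]
            have hne : k + x ≠ a := by omega
            apply hV2 k hk (by omega)
            rintro ⟨hp1, hp2⟩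
            rw [hmaxa] at hp2
            exact hnot ⟨hp1, by omega⟩
        apply ih (a + 1) _ hInv' (by omega) (by omega) (by push_cast at hf ⊢; omega)

lemma pvAlt_spec (arr : List Int) (x : Int) (hx : 0 < x) :
    0 ≤ getMaximumMex_alt arr x ∧
    (∀ k, 0 ≤ k → k < getMaximumMex_alt arr x → pvInC arr x k) ∧
    ¬ pvInC arr x (getMaximumMex_alt arr x) ∧
    getMaximumMex_alt arr x ≤ pvResC arr x 0 * x := by
  have hsz : (0 : Int) ≤ ((arr.foldl (fun d item => d.insert (PySem.Int.mod item x) (d.getD (PySem.Int.mod item x) 0 + 1)) (PySem.Dict.empty : PySem.Dict Int Int)).size : Int) := by positivity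
  set S : Int := ((arr.foldl (fun d item => d.insert (PySem.Int.mod item x) (d.getD (PySem.Int.mod item x) 0 + 1)) (PySem.Dict.empty : PySem.Dict Int Int)).size : Int) with hS
  -- pigeonhole: if the bound was cut below x, some residue in [0, S] is absent
  have habsent : S + 1 ≤ x → ∃ r0, 0 ≤ r0 ∧ r0 ≤ S ∧ pvResC arr x r0 = 0 := by
    intro hcut
    by_contra hcon
    push Not at hcon
    have hsub : PySem.List.pyRange 0 (S + 1) 1 ⊆
        (arr.foldl (fun d item => d.insert (PySem.Int.mod item x) (d.getD (PySem.Int.mod item x) 0 + 1)) (PySem.Dict.empty : PySem.Dict Int Int)).keys := by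
      intro r hr
      obtain ⟨hr0, hr1⟩ := PySem.List.mem_pyRange_one.mp hr
      have hpos : 0 < pvResC arr x r := by
        have hne := hcon r hr0 (by omega)
        have : 0 ≤ pvResC arr x r := by unfold pvResC; positivity
        omega
      exact (PySem.Dict.contains_iff_mem_keys _ r).mp
        ((pvCounts_contains arr x r).mpr ((pvMem_map_iff arr x r hx).mpr ⟨hr0, by omega, hpos⟩))
    have hlen := calc (PySem.List.pyRange 0 (S + 1) 1).length
        = (PySem.List.pyRange 0 (S + 1) 1).toFinset.card :=
          (List.toFinset_card_of_nodup (PySem.List.nodup_pyRange_one 0 (S + 1))).symm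
      _ ≤ ((arr.foldl (fun d item => d.insert (PySem.Int.mod item x) (d.getD (PySem.Int.mod item x) 0 + 1)) (PySem.Dict.empty : PySem.Dict Int Int)).keys).toFinset.card :=
          Finset.card_le_card (by intro a ha; simp only [List.mem_toFinset] at ha ⊢; exact hsub ha)
      _ ≤ ((arr.foldl (fun d item => d.insert (PySem.Int.mod item x) (d.getD (PySem.Int.mod item x) 0 + 1)) (PySem.Dict.empty : PySem.Dict Int Int)).keys).length :=
          List.toFinset_card_le _
    rw [PySem.List.length_pyRange_one] at hlen
    have hkeyslen : ((arr.foldl (fun d item => d.insert (PySem.Int.mod item x) (d.getD (PySem.Int.mod item x) 0 + 1)) (PySem.Dict.empty : PySem.Dict Int Int)).keys).length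
        = (arr.foldl (fun d item => d.insert (PySem.Int.mod item x) (d.getD (PySem.Int.mod item x) 0 + 1)) (PySem.Dict.empty : PySem.Dict Int Int)).size := by
      simp [PySem.Dict.size, PySem.Dict.keys]
    rw [hkeyslen] at hlen
    omega
  have hbpos : 0 < min x (S + 1) := by omega
  have hmapeq : (PySem.List.pyRange 0 (min x (S + 1)) 1).map
        (fun r => r + (arr.foldl (fun d item => d.insert (PySem.Int.mod item x) (d.getD (PySem.Int.mod item x) 0 + 1)) PySem.Dict.empty).getD r 0 * x)
      = (PySem.List.pyRange 0 (min x (S + 1)) 1).map (fun r => r + pvResC arr x r * x) :=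
    List.map_congr_left (fun r _ => by rw [pvCounts_getD])
  have h0mem : ((0 : Int) + pvResC arr x 0 * x) ∈ (PySem.List.pyRange 0 (min x (S + 1)) 1).map (fun r => r + pvResC arr x r * x) :=
    List.mem_map.mpr ⟨0, PySem.List.mem_pyRange_one.mpr ⟨le_rfl, hbpos⟩, rfl⟩
  simp only [getMaximumMex_alt, ← hS]
  rw [hmapeq]
  cases hmin : PySem.List.min? ((PySem.List.pyRange 0 (min x (S + 1)) 1).map (fun r => r + pvResC arr x r * x)) (fun y => y) with
  | none =>
    rw [PySem.List.min?_eq_none_iff] at hmin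
    rw [hmin] at h0mem
    simp at h0mem
  | some m =>
    have hmem := PySem.List.min?_mem hmin
    have hmin' := PySem.List.min?_isMin hmin
    obtain ⟨r, hr, rfl⟩ := List.mem_map.mp hmem
    obtain ⟨hr0, hrb⟩ := PySem.List.mem_pyRange_one.mp hr
    have hrx : r < x := by omega
    have hc0 : 0 ≤ pvResC arr x r := by unfold pvResC; positivity
    have hmodm : PySem.Int.mod (r + pvResC arr x r * x) x = r := by
      rw [PySem.Int.mod_eq_emod_of_pos hx, Int.add_mul_emod_self_right, Int.emod_eq_of_lt hr0 hrx]
    refine ⟨by nlinarith, ?_, ?_, ?_⟩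
    · intro k hk0 hkm
      have hs0 : 0 ≤ PySem.Int.mod k x := PySem.Int.mod_nonneg k hx
      have hsx : PySem.Int.mod k x < x := PySem.Int.mod_lt k hx
      have hcs : 0 ≤ pvResC arr x (PySem.Int.mod k x) := by unfold pvResC; positivity
      refine ⟨hk0, ?_⟩
      by_cases hsb : PySem.Int.mod k x < min x (S + 1)
      · have hsm : PySem.Int.mod k x + pvResC arr x (PySem.Int.mod k x) * x ∈
            (PySem.List.pyRange 0 (min x (S + 1)) 1).map (fun r => r + pvResC arr x r * x) :=
          List.mem_map.mpr ⟨PySem.Int.mod k x, PySem.List.mem_pyRange_one.mpr ⟨hs0, hsb⟩, rfl⟩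
        have := hmin' _ hsm
        linarith [this]
      · -- the residue of k lies beyond the cut: an absent smaller residue bounds m
        obtain ⟨r0, h00, h01, h02⟩ := habsent (by omega)
        have hr0m : (r0 + pvResC arr x r0 * x) ∈
            (PySem.List.pyRange 0 (min x (S + 1)) 1).map (fun r => r + pvResC arr x r * x) :=
          List.mem_map.mpr ⟨r0, PySem.List.mem_pyRange_one.mpr ⟨h00, by omega⟩, rfl⟩
        have := hmin' _ hr0m
        rw [h02] at this
        have hminx : S + 1 ≤ PySem.Int.mod k x := by omega
        linarith [mul_nonneg hcs hx.le, this]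
    · rintro ⟨_, hlt⟩
      rw [hmodm] at hlt
      linarith
    · have := hmin' _ h0mem
      linarith [this]

-- ===== VERDICT (by name: the statement is the Claim_ definition above) =====
theorem getMaximumMex_spec : Claim_equal_getMaximumMex := by
  intro arr x _ hpre
  unfold Spec_getMaximumMex
  have hx : 0 < x := hpre
  obtain ⟨hM0, hMlow, hMtop, hMbound⟩ := pvAlt_spec arr x hx
  have hcount : pvResC arr x 0 ≤ (arr.length : Int) := by
    have := List.count_le_length (a := (0 : Int)) (l := arr.map (fun it => PySem.Int.mod it x))
    simp only [List.length_map] at this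
    unfold pvResC
    exact_mod_cast this
  show getMaximumMex arr x = getMaximumMex_alt arr x
  unfold getMaximumMex
  apply pvMexLoop_eq arr x _ hx hM0 hMlow hMtop _ 0 _ (pvInv_init arr x hx) le_rfl hM0
  push_cast [Int.toNat_of_nonneg hx.le]
  nlinarith [hMbound, hcount, hx]
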